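-- pv_equiv track=rewrite | github.com/jennifer88huang/GTPlanner | agent/subflows/short_planning/nodes/document_formatting_node.py | _generate_risk_assessment
-- ===== SOURCE A (Python) =====
-- from typing import Dict, Any, List
--
-- def _generate_risk_assessment(execution_plan: Dict[str, Any]) -> str:
--     """生成风险评估"""
--
--     execution_phases = execution_plan.get("execution_phases", [])
--     all_risks = []
--
--     for phase in execution_phases:
--         phase_risks = phase.get("risks", [])
--         all_risks.extend(phase_risks)
--
--     if all_risks:
--         unique_risks = list(dict.fromkeys(all_risks))[:5]  # 最多5个主要风险
--         assessment = f"主要风险包括：{', '.join(unique_risks)}。需要制定相应的应对策略。"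
--     else:
--         assessment = "暂未识别到重大风险，但需要在实施过程中持续监控。"
--
--     return assessment
-- ===== SOURCE B (Python) =====
-- from typing import Dict, Any
--
-- def _generate_risk_assessment(execution_plan: Dict[str, Any]) -> str:
--     """生成风险评估 — single fused pass: dedupe while scanning, stop at 5 risks."""
--     seen = set()
--     unique_risks = []
--     for phase in execution_plan.get("execution_phases", []):
--         for risk in phase.get("risks", []):
--             if risk not in seen:
--                 seen.add(risk)
--                 unique_risks.append(risk)
--                 if len(unique_risks) == 5:
--                     break
--         else:
--             continue
--         break
--     if unique_risks:
--         return f"主要风险包括：{', '.join(unique_risks)}。需要制定相应的应对策略。"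
--     return "暂未识别到重大风险，但需要在实施过程中持续监控。"
-- ===== Notes on version B (the rewrite author's own statement) =====
-- stated objective: alternative
-- what changed: A flattens all phase risks into one list, dedupes it with dict.fromkeys and then slices to 5; B is a single fused pass over phases and risks maintaining a seen-set and output list, breaking out of both loops as soon as 5 unique risks are collected.
import Mathlib
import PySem

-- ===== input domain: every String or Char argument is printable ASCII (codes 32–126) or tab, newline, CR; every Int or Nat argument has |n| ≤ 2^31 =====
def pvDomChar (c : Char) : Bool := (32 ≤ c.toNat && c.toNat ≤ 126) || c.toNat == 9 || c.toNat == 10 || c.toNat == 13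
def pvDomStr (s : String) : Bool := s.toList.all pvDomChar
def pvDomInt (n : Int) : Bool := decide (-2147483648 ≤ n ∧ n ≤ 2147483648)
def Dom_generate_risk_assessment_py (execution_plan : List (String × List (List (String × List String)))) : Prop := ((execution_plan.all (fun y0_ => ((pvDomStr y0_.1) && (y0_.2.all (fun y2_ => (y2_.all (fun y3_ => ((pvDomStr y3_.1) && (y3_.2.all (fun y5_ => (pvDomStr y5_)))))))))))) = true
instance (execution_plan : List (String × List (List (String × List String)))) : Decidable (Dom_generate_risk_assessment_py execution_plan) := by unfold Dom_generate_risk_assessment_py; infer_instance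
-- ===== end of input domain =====

-- One honest line: B fuses A's flatten→dedupe→slice-to-5 pipeline into a single nested
-- pass with a seen-set and an early break at 5 unique risks; same output, similar cost.

-- ===== PORT A =====
def generate_risk_assessment_py (execution_plan : List (String × List (List (String × List String)))) : String :=
  let execution_phases := (PySem.Dict.get? ⟨execution_plan⟩ "execution_phases").getD []
  let all_risks := execution_phases.foldl
    (fun acc phase => acc ++ (PySem.Dict.get? ⟨phase⟩ "risks").getD []) []
  if all_risks.isEmpty then
    "暂未识别到重大风险，但需要在实施过程中持续监控。"
  else
    let unique_risks := PySem.List.slice (PySem.List.dedup all_risks) none (some 5)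
    "主要风险包括：" ++ PySem.Str.join ", " unique_risks ++ "。需要制定相应的应对策略。"

-- ===== PORT B =====
-- inner for-loop of B: scan one phase's risks; Bool = did we `break` (hit 5 unique risks)
def pvInnerB (risks : List String) (seen : PySem.Set String) (acc : List String) :
    PySem.Set String × List String × Bool :=
  match risks with
  | [] => (seen, acc, false)
  | r :: rs =>
    if PySem.Set.contains seen r then pvInnerB rs seen acc
    else
      let seen' := seen.add r
      let acc' := acc ++ [r]
      if acc'.length == 5 then (seen', acc', true)
      else pvInnerB rs seen' acc'

-- outer for-loop of B: for each phase run the inner loop; stop when it broke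
def pvOuterB (phases : List (List (String × List String)))
    (seen : PySem.Set String) (acc : List String) : List String :=
  match phases with
  | [] => acc
  | p :: ps =>
    let res := pvInnerB ((PySem.Dict.get? ⟨p⟩ "risks").getD []) seen acc
    if res.2.2 then res.2.1 else pvOuterB ps res.1 res.2.1

def generate_risk_assessment_py_alt (execution_plan : List (String × List (List (String × List String)))) : String :=
  let unique_risks := pvOuterB ((PySem.Dict.get? ⟨execution_plan⟩ "execution_phases").getD [])
      PySem.Set.empty []
  if unique_risks.isEmpty then
    "暂未识别到重大风险，但需要在实施过程中持续监控。"
  else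
    "主要风险包括：" ++ PySem.Str.join ", " unique_risks ++ "。需要制定相应的应对策略。"

-- ===== PRECONDITION & SPEC =====
def Spec_generate_risk_assessment_py (execution_plan : List (String × List (List (String × List String)))) (out : String) : Prop := out = generate_risk_assessment_py_alt execution_plan
instance (execution_plan : List (String × List (List (String × List String)))) (out : String) : Decidable (Spec_generate_risk_assessment_py execution_plan out) := by unfold Spec_generate_risk_assessment_py; infer_instance

-- ===== CLAIM (what is proved, stated in full; the proofs are below) =====
def Claim_equal_generate_risk_assessment_py : Prop := ∀ (execution_plan : List (String × List (List (String × List String)))), Dom_generate_risk_assessment_py execution_plan → Spec_generate_risk_assessment_py execution_plan (generate_risk_assessment_py execution_plan)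

-- ===== LEMMAS AND PROOFS =====

-- A's dedupe fold (foldl of Set.add) only ever appends on the right
lemma foldl_add_prefix (xs : List String) (s : PySem.Set String) :
    ∃ t, List.foldl PySem.Set.add s xs = s ++ t := by
  induction xs generalizing s with
  | nil => exact ⟨[], by simp⟩
  | cons x xs ih =>
    rw [List.foldl_cons]
    obtain ⟨t, ht⟩ := ih (PySem.Set.add s x)
    by_cases hx : PySem.Set.contains s x = true
    · have e : PySem.Set.add s x = s := by rw [PySem.Set.add, if_pos hx]
      rw [e] at ht ⊢
      exact ⟨t, ht⟩
    · have e : PySem.Set.add s x = s ++ [x] := by rw [PySem.Set.add, if_neg hx]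
      rw [e] at ht ⊢
      exact ⟨x :: t, by rw [ht]; simp⟩

-- B's inner loop (entered with seen = acc, fewer than 5 collected) computes the
-- first-5 prefix of continuing A's dedupe fold, and breaks iff it filled up to 5
lemma innerB_eq (xs : List String) (s : List String) (hs : s.length < 5) :
    pvInnerB xs s s =
      ((List.foldl PySem.Set.add s xs).take 5,
       (List.foldl PySem.Set.add s xs).take 5,
       ((List.foldl PySem.Set.add s xs).take 5).length == 5) := by
  induction xs generalizing s with
  | nil =>
    simp only [pvInnerB, List.foldl_nil, List.take_of_length_le (le_of_lt hs)]
    have h : (s.length == 5) = false := by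
      simp only [beq_eq_false_iff_ne, ne_eq]; omega
    rw [h]
  | cons r rs ih =>
    by_cases hc : PySem.Set.contains s r = true
    · have hadd : PySem.Set.add s r = s := by rw [PySem.Set.add, if_pos hc]
      simp only [pvInnerB]
      rw [if_pos hc, List.foldl_cons, hadd]
      exact ih s hs
    · have hadd : PySem.Set.add s r = s ++ [r] := by rw [PySem.Set.add, if_neg hc]
      have hlen : (s ++ [r]).length = s.length + 1 := by simp
      simp only [pvInnerB]
      rw [if_neg hc, List.foldl_cons, hadd]
      by_cases h5 : (s ++ [r]).length = 5
      · rw [if_pos (by simp [h5] : ((s ++ [r]).length == 5) = true)]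
        obtain ⟨t, ht⟩ := foldl_add_prefix rs (s ++ [r])
        have htake : (List.foldl PySem.Set.add (s ++ [r]) rs).take 5 = s ++ [r] := by
          rw [ht, List.take_append_of_le_length (by omega), List.take_of_length_le (by omega)]
        rw [htake]
        simp [h5]
      · have h5' : s.length + 1 ≠ 5 := by rwa [hlen] at h5
        rw [if_neg (by rw [hlen]; simpa using h5')]
        exact ih (s ++ [r]) (by rw [hlen]; omega)

-- B's outer loop = take-5 of A's dedupe fold over the flattened risks
lemma outerB_eq (phases : List (List (String × List String))) (s : List String)
    (hs : s.length < 5) :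
    pvOuterB phases s s =
      (List.foldl PySem.Set.add s
        (phases.flatMap (fun p => (PySem.Dict.get? ⟨p⟩ "risks").getD []))).take 5 := by
  induction phases generalizing s with
  | nil =>
    simp only [pvOuterB, List.flatMap_nil, List.foldl_nil,
      List.take_of_length_le (le_of_lt hs)]
  | cons p ps ih =>
    simp only [pvOuterB, innerB_eq _ s hs, List.flatMap_cons, List.foldl_append]
    set t0 := List.foldl PySem.Set.add s ((PySem.Dict.get? ⟨p⟩ "risks").getD []) with ht0
    have hmin : (t0.take 5).length = min 5 t0.length := List.length_take
    by_cases h5 : (t0.take 5).length = 5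
    · have hlen : 5 ≤ t0.length := by rw [hmin] at h5; omega
      obtain ⟨u, hu⟩ := foldl_add_prefix
        (ps.flatMap (fun p => (PySem.Dict.get? ⟨p⟩ "risks").getD [])) t0
      have htk : (List.foldl PySem.Set.add t0
          (ps.flatMap (fun p => (PySem.Dict.get? ⟨p⟩ "risks").getD []))).take 5 = t0.take 5 := by
        rw [hu, List.take_append_of_le_length hlen]
      simp [h5, htk]
    · have hlt : t0.length < 5 := by
        rcases Nat.lt_or_ge t0.length 5 with h | h
        · exact h
        · exact absurd (by rw [hmin]; omega) h5
      have hb : ((t0.take 5).length == 5) = false := by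
        rw [hmin]
        simp
        omega
      have htid : t0.take 5 = t0 := List.take_of_length_le (le_of_lt hlt)
      simp only [hb]
      simp only [Bool.false_eq_true, if_false, htid]
      exact ih t0 hlt

-- A's flatten fold is the flatMap of the risks lists
lemma allRisks_flatMap (phases : List (List (String × List String))) :
    phases.foldl (fun acc phase => acc ++ (PySem.Dict.get? ⟨phase⟩ "risks").getD []) [] =
      phases.flatMap (fun p => (PySem.Dict.get? ⟨p⟩ "risks").getD []) := by
  simpa using PySem.List.foldl_append_eq_flatMap
    (fun p : List (String × List String) => (PySem.Dict.get? ⟨p⟩ "risks").getD []) phases []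

lemma dedup_nil_iff (xs : List String) : PySem.List.dedup xs = [] ↔ xs = [] := by
  constructor
  · intro h
    cases xs with
    | nil => rfl
    | cons x xs =>
      have hx : x ∈ PySem.List.dedup (x :: xs) := by
        rw [PySem.List.dedup]
        exact (PySem.Set.mem_ofList _ _).mpr (List.mem_cons_self)
      rw [h] at hx; exact absurd hx (List.not_mem_nil)
  · intro h; subst h; rfl

-- ===== VERDICT (by name: the statement is the Claim_ definition above) =====
theorem generate_risk_assessment_py_spec : Claim_equal_generate_risk_assessment_py := by
  intro ep _
  unfold Spec_generate_risk_assessment_py generate_risk_assessment_py generate_risk_assessment_py_alt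
  set phases := (PySem.Dict.get? ⟨ep⟩ "execution_phases").getD [] with hph
  set flat := phases.flatMap (fun p => (PySem.Dict.get? ⟨p⟩ "risks").getD []) with hflat
  have houter : pvOuterB phases PySem.Set.empty [] = (PySem.List.dedup flat).take 5 := by
    have h := outerB_eq phases [] (by norm_num)
    simpa [PySem.Set.empty, PySem.List.dedup, PySem.Set.ofList, hflat] using h
  have hslice : PySem.List.slice (PySem.List.dedup flat) none (some 5)
      = (PySem.List.dedup flat).take 5 := by
    rw [PySem.List.slice_to _ (by norm_num)]
    rfl
  by_cases hf : flat = []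
  · have hE : pvOuterB phases [] [] = [] := by
      show pvOuterB phases PySem.Set.empty [] = []
      rw [houter, hf]
      rfl
    have hAe : flat.isEmpty = true := by rw [hf]; rfl
    simp [allRisks_flatMap phases, ← hflat, hAe, hE]
  · have hd : PySem.List.dedup flat ≠ [] := fun h => hf ((dedup_nil_iff flat).mp h)
    have ht : (PySem.List.dedup flat).take 5 ≠ [] := by
      cases h : PySem.List.dedup flat with
      | nil => exact absurd h hd
      | cons a l => simp
    have hA : flat.isEmpty = false := by simp [hf]
    have hBe : (List.take 5 (PySem.List.dedup flat)).isEmpty = false := by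
      simpa [List.isEmpty_iff] using ht
    simp only [allRisks_flatMap phases, ← hflat, hA, hBe, Bool.false_eq_true, if_false,
      houter, hslice]
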